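-- pv_equiv track=rewrite | github.com/aby639/ScentMatch-AI- | app.py | _matches_pref
-- ===== SOURCE A (Python) =====
-- from typing import List, Dict, Any, Optional
--
-- def _normalize(s: Optional[str]) -> str:
--     return s.strip().lower() if isinstance(s, str) else ""
--
-- def _matches_pref(value: Optional[str], options: Optional[list[str]]) -> bool:
--     """
--     Check if a preference fits a list.
--     - Accepts comma-, slash-, or space-separated input ("fresh, clean long lasting")
--     - Case-insensitive and partial matching.
--     """
--     if not value:
--         return True
--     if not options:
--         return True
--
--     value = _normalize(value)
--     raw = value.replace("/", " ").replace(",", " ")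
--     tokens = [t.strip() for t in raw.split() if t.strip()]
--     options_norm = [_normalize(o) for o in options]
--     return any(tok in opt for tok in tokens for opt in options_norm)
-- ===== SOURCE B (Python) =====
-- from typing import Optional
--
-- def _normalize(s: Optional[str]) -> str:
--     return s.strip().lower() if isinstance(s, str) else ""
--
-- def _matches_pref(value: Optional[str], options: Optional[list[str]]) -> bool:
--     # Sliding-window + hash-set algorithm: instead of running a substring
--     # search for every (token, option) pair, put the tokens in a hash set,
--     # collect their distinct lengths, and slide windows of those lengths over
--     # each normalized option, testing each window against the token set.
--     if not value or not options:
--         return True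
--     raw = _normalize(value).replace("/", " ").replace(",", " ")
--     toks = set(raw.split())
--     lengths = {len(t) for t in toks}
--     for opt in options:
--         o = _normalize(opt)
--         for L in lengths:
--             for i in range(len(o) - L + 1):
--                 if o[i:i + L] in toks:
--                     return True
--     return False
-- ===== Notes on version B (the rewrite author's own statement) =====
-- stated objective: alternative
-- what changed: B inverts the search: instead of running a substring search for every (token, option) pair, it builds a hash set of the tokens and their distinct lengths and slides windows of those lengths over each normalized option, testing each window against the token set.
import Mathlib
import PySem

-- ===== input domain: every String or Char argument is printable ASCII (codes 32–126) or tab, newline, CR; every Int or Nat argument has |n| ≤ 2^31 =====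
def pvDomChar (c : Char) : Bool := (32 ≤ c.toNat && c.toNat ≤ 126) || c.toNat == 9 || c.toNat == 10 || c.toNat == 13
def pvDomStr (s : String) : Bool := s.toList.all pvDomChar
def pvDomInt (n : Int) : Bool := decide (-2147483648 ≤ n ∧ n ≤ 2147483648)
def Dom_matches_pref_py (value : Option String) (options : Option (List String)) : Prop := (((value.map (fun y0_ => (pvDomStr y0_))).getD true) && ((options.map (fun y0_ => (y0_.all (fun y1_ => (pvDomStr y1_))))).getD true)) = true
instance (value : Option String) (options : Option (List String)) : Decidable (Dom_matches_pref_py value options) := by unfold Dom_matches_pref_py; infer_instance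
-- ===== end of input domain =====

-- B replaces A's per-(token, option) substring searches by a hash-set of the tokens plus a
-- sliding-window scan of each normalized option at the tokens' distinct lengths; same result.

-- ===== PORT A =====
-- _normalize on an actual string (both Pythons only apply it to str arguments)
def pvNormalize (s : String) : String := PySem.Str.lower (PySem.Str.strip s)

def matches_pref_py (value : Option String) (options : Option (List String)) : Bool :=
  match value with
  | none => true            -- `if not value`
  | some v =>
    if v == "" then true
    else
      match options with
      | none => true        -- `if not options`
      | some opts =>
        if opts == [] then true
        else
          let v1 := pvNormalize v
          let raw := PySem.Str.replace (PySem.Str.replace v1 "/" " ") "," " "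
          let tokens := ((PySem.Str.split₀ raw).map PySem.Str.strip).filter (fun t => t != "")
          let optionsNorm := opts.map pvNormalize
          tokens.any (fun tok => optionsNorm.any (fun opt => PySem.Str.isIn tok opt))

-- ===== PORT B =====
def matches_pref_py_alt (value : Option String) (options : Option (List String)) : Bool :=
  match value, options with
  | none, _ => true
  | _, none => true
  | some v, some opts =>
    if v == "" || opts == [] then true
    else
      let raw := PySem.Str.replace (PySem.Str.replace (pvNormalize v) "/" " ") "," " "
      let toks := PySem.Set.ofList (PySem.Str.split₀ raw)
      let lengths := PySem.Set.ofList (toks.map PySem.Str.len)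
      -- the triple early-return loop; its Bool result is iteration-order independent
      opts.any (fun opt =>
        let o := pvNormalize opt
        lengths.any (fun L =>
          (PySem.List.pyRange 0 (PySem.Str.len o - L + 1) 1).any (fun i =>
            toks.contains (PySem.Str.slice o (some i) (some (i + L))))))

-- ===== PRECONDITION & SPEC =====
def Spec_matches_pref_py (value : Option String) (options : Option (List String)) (out : Bool) : Prop := out = matches_pref_py_alt value options
instance (value : Option String) (options : Option (List String)) (out : Bool) : Decidable (Spec_matches_pref_py value options out) := by unfold Spec_matches_pref_py; infer_instance

-- ===== CLAIM (what is proved, stated in full; the proofs are below) =====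
def Claim_equal_matches_pref_py : Prop := ∀ (value : Option String) (options : Option (List String)), Dom_matches_pref_py value options → Spec_matches_pref_py value options (matches_pref_py value options)

-- ===== LEMMAS AND PROOFS =====

lemma split₀_go_good (s : List Char) : ∀ (cur : List Char) (acc : List (List Char)) (_ : ∀ c ∈ cur, PySem.Chars.isspace c = false)
    (_ : ∀ t ∈ acc, t ≠ [] ∧ ∀ c ∈ t, PySem.Chars.isspace c = false),
    ∀ t ∈ PySem.Chars.split₀.go s cur acc, t ≠ [] ∧ ∀ c ∈ t, PySem.Chars.isspace c = false := by
  induction s with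
  | nil =>
    intro cur acc hcur hacc t ht
    simp only [PySem.Chars.split₀.go] at ht
    split at ht
    · exact hacc t (by simpa using ht)
    · rw [List.mem_reverse] at ht
      rcases List.mem_cons.mp ht with rfl | ht
      · rename_i h
        refine ⟨by simpa [List.isEmpty_iff] using h, fun d hd => hcur d (by simpa using hd)⟩
      · exact hacc t ht
  | cons c rest ih =>
    intro cur acc hcur hacc t ht
    simp only [PySem.Chars.split₀.go] at ht
    split at ht
    · split at ht
      · exact ih [] acc (by simp) hacc t ht
      · refine ih [] (cur.reverse :: acc) (by simp) ?_ t ht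
        intro u hu
        rcases List.mem_cons.mp hu with rfl | hu
        · rename_i _ h
          refine ⟨by simpa [List.isEmpty_iff] using h, fun d hd => hcur d (by simpa using hd)⟩
        · exact hacc u hu
    · refine ih (c :: cur) acc ?_ hacc t ht
      intro d hd
      rcases List.mem_cons.mp hd with rfl | hd
      · rename_i h; simpa using h
      · exact hcur d hd

lemma split₀_good (s : List Char) : ∀ t ∈ PySem.Chars.split₀ s, t ≠ [] ∧ ∀ c ∈ t, PySem.Chars.isspace c = false :=
  split₀_go_good s [] [] (by simp) (by simp)

lemma strip_of_nospace (t : List Char) (h : ∀ c ∈ t, PySem.Chars.isspace c = false) : PySem.Chars.strip t = t := by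
  have hl : PySem.Chars.lstrip t = t := by
    cases t with
    | nil => rfl
    | cons c r => simp [PySem.Chars.lstrip, h c (by simp)]
  have hr : PySem.Chars.rstrip t = t := by
    unfold PySem.Chars.rstrip
    rcases List.eq_nil_or_concat t with rfl | ⟨r, c, rfl⟩
    · rfl
    · simp [h c (by simp)]
  simp [PySem.Chars.strip, hl, hr]

-- tokens of A (strip-and-filter of split()) are exactly the split pieces
lemma tokens_collapse (raw : String) :
    ((PySem.Str.split₀ raw).map PySem.Str.strip).filter (fun t => t != "")
      = PySem.Str.split₀ raw := by
  have hgood := split₀_good raw.toList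
  show ((((PySem.Chars.split₀ raw.toList).map String.ofList).map PySem.Str.strip).filter (fun t => t != ""))
    = (PySem.Chars.split₀ raw.toList).map String.ofList
  rw [List.map_map]
  rw [List.map_congr_left (g := String.ofList) (fun pc hpc => by
    show PySem.Str.strip (String.ofList pc) = String.ofList pc
    simp [PySem.Str.strip, strip_of_nospace pc (hgood pc hpc).2])]
  apply List.filter_eq_self.mpr
  intro x hx
  rcases List.mem_map.mp hx with ⟨pc, hpc, rfl⟩
  have hne : pc ≠ [] := (hgood pc hpc).1
  simp only [bne_iff_ne, ne_eq]
  intro hcon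
  exact hne (by simpa using congrArg String.toList hcon)

-- a slice window of an option is an infix of it
lemma window_infix (o : String) (i L : Int) (hi : 0 ≤ i) (hL : 0 ≤ L) :
    (PySem.Str.slice o (some i) (some (i + L))).toList <:+: o.toList := by
  have : (PySem.Str.slice o (some i) (some (i + L))).toList
      = (o.toList.drop i.toNat).take ((i + L).toNat - i.toNat) := by
    simp [PySem.Str.slice]
    rw [PySem.List.slice_toNat _ hi (by omega)]
  rw [this]
  exact (List.take_prefix _ _).isInfix.trans (List.drop_suffix _ _).isInfix

-- the sliding-window pass over one option finds exactly the tokens that are substrings of it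
lemma per_opt (tokens : List String) (o : String) :
    (PySem.Set.ofList ((PySem.Set.ofList tokens).map PySem.Str.len)).any (fun L =>
        (PySem.List.pyRange 0 (PySem.Str.len o - L + 1) 1).any (fun i =>
          (PySem.Set.ofList tokens).contains (PySem.Str.slice o (some i) (some (i + L)))))
      = tokens.any (fun tok => PySem.Str.isIn tok o) := by
  apply Bool.eq_iff_iff.mpr
  simp only [List.any_eq_true, PySem.Set.mem_ofList, List.mem_map,
    PySem.List.mem_pyRange_one, PySem.Str.isIn_iff_infix]
  constructor
  · rintro ⟨L, ⟨t, ht, rfl⟩, i, ⟨hi0, _⟩, hw⟩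
    have hL : 0 ≤ PySem.Str.len t := by rw [PySem.Str.len_eq]; positivity
    exact ⟨_, (PySem.Set.mem_ofList tokens _).mp (List.contains_iff_mem.mp hw),
      window_infix o i _ hi0 hL⟩
  · rintro ⟨tok, htok, s, u, he⟩
    refine ⟨PySem.Str.len tok, ⟨tok, htok, rfl⟩,
      (s.length : Int), ⟨by positivity, ?_⟩, ?_⟩
    · have hlen : o.toList.length = s.length + tok.toList.length + u.length := by
        rw [← he]; simp; omega
      rw [PySem.Str.len_eq, PySem.Str.len_eq, hlen]
      omega
    · apply List.contains_iff_mem.mpr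
      apply (PySem.Set.mem_ofList tokens _).mpr
      have hsl : (PySem.Str.slice o (some (s.length : Int))
          (some ((s.length : Int) + PySem.Str.len tok))).toList = tok.toList := by
        simp only [PySem.Str.len_eq]
        simp [PySem.Str.slice]
        rw [PySem.List.slice_natCast_add, ← he, List.append_assoc, List.drop_left]
        exact List.take_left' (by simp)
      rw [String.toList_inj.mp hsl]
      exact htok

set_option maxHeartbeats 1000000 in
lemma ab_eq : ∀ (value : Option String) (options : Option (List String)),
    matches_pref_py value options = matches_pref_py_alt value options := by
  intro value options
  cases value with
  | none => rfl
  | some v =>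
    cases options with
    | none => simp [matches_pref_py, matches_pref_py_alt]
    | some opts =>
      by_cases hv : v == ""
      · simp [matches_pref_py, matches_pref_py_alt, hv]
      by_cases ho : opts == []
      · simp [matches_pref_py, matches_pref_py_alt, hv, ho]
      simp only [matches_pref_py, matches_pref_py_alt, hv, ho, Bool.or_self,
        Bool.false_eq_true, if_false]
      rw [tokens_collapse]
      set raw := PySem.Str.replace (PySem.Str.replace (pvNormalize v) "/" " ") "," " " with hraw
      set tokens := PySem.Str.split₀ raw with htk
      -- swap A's token/option quantifier order, then apply the per-option window lemma
      have hswap : tokens.any (fun tok => (opts.map pvNormalize).any (fun opt => PySem.Str.isIn tok opt))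
          = (opts.map pvNormalize).any (fun opt => tokens.any (fun tok => PySem.Str.isIn tok opt)) := by
        apply Bool.eq_iff_iff.mpr
        simp only [List.any_eq_true]
        exact ⟨fun ⟨t, ht, o, hopt, h⟩ => ⟨o, hopt, t, ht, h⟩,
               fun ⟨o, hopt, t, ht, h⟩ => ⟨t, ht, o, hopt, h⟩⟩
      rw [hswap, List.any_map]
      refine PySem.List.any_congr_mem ?_
      intro opt _
      dsimp only [Function.comp]
      exact (per_opt tokens (pvNormalize opt)).symm

-- ===== VERDICT (by name: the statement is the Claim_ definition above) =====
theorem matches_pref_py_spec : Claim_equal_matches_pref_py := by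
  intro value options _
  unfold Spec_matches_pref_py
  exact ab_eq value options
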